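-- pv_equiv track=rewrite | github.com/Coppede-Santos/ia-uncuyo-2024 | tp6-csp/code/backtrackingCSP.py | estan_en_diagonal
-- ===== SOURCE A (Python) =====
-- def estan_en_diagonal(vector, n):
--     """Verificar si hay elementos en diagonal conflictiva."""
--     for fila1 in range(n):
--         if vector[fila1] is None or isinstance(vector[fila1], list):
--             continue
--         for fila2 in range(fila1 + 1, n):
--             if vector[fila2] is None or isinstance(vector[fila2], list):
--                 continue
--             if abs(fila1 - fila2) == abs(vector[fila1] - vector[fila2]):
--                 return True
--     return False
-- ===== SOURCE B (Python) =====
-- def estan_en_diagonal(vector, n):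
--     """Verificar si hay elementos en diagonal conflictiva (one pass over the rows, alternative algorithm)."""
--     diffs = set()
--     sums = set()
--     for fila in range(n):
--         col = vector[fila]
--         if col is None or isinstance(col, list):
--             continue
--         if col - fila in diffs or col + fila in sums:
--             return True
--         diffs.add(col - fila)
--         sums.add(col + fila)
--     return False
-- ===== Notes on version B (the rewrite author's own statement) =====
-- stated objective: alternative
-- what changed: Replaced the all-pairs nested-loop diagonal check by a single pass that records col-fila and col+fila in two sets and reports a conflict on the first repeated value (a timing run's inputs hit an early conflict, so no speed-up was measured).
-- outside the precondition, e.g. on estan_en_diagonal([0, 1], 3): A returns True, B returns True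
import Mathlib
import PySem

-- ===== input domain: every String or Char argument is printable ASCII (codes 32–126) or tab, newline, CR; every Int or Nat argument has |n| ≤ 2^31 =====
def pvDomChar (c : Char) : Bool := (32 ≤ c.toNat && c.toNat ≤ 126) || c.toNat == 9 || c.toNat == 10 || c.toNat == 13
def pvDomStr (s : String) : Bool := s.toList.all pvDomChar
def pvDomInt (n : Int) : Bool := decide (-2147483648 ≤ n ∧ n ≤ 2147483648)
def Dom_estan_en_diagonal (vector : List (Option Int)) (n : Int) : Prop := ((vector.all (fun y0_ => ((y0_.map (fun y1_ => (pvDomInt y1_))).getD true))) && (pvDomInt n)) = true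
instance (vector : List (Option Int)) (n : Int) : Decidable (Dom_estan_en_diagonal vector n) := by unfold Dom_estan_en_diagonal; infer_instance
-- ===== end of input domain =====

-- B replaces A's all-pairs nested-loop diagonal scan by a single pass recording col-fila and col+fila in two sets (alternative algorithm; no speed-up measured).


-- ===== PORT A =====
-- inner loop: 'for fila2 in range(fila1+1, n)' as a counting loop (range is lazy in Python);
-- pyGet? = none (IndexError, excluded by Pre_) stops with false
def pvInnerA (vector : List (Option Int)) (f1 v1 f2 n : Int) : Bool :=
  if f2 < n then
    match PySem.List.pyGet? vector f2 with
    | none => false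
    | some none => pvInnerA vector f1 v1 (f2 + 1) n
    | some (some v2) =>
      if (f1 - f2).natAbs == (v1 - v2).natAbs then true else pvInnerA vector f1 v1 (f2 + 1) n
  else false
termination_by (n - f2).toNat
decreasing_by all_goals simp_wf; omega

-- outer loop: 'for fila1 in range(n)'  (elements are Option Int, so 'isinstance(..., list)' can never hold)
def pvOuterA (vector : List (Option Int)) (n f1 : Int) : Bool :=
  if f1 < n then
    match PySem.List.pyGet? vector f1 with
    | none => false
    | some none => pvOuterA vector n (f1 + 1)
    | some (some v1) =>
      if pvInnerA vector f1 v1 (f1 + 1) n then true else pvOuterA vector n (f1 + 1)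
  else false
termination_by (n - f1).toNat
decreasing_by all_goals simp_wf; omega

def estan_en_diagonal (vector : List (Option Int)) (n : Int) : Bool :=
  pvOuterA vector n 0

-- ===== PORT B =====
-- one pass: 'for fila in range(n)' as a counting loop, sets diffs (col-fila) and sums (col+fila)
def pvLoopB (vector : List (Option Int)) (diffs sums : PySem.Set Int) (f n : Int) : Bool :=
  if f < n then
    match PySem.List.pyGet? vector f with
    | none => false
    | some none => pvLoopB vector diffs sums (f + 1) n
    | some (some v) =>
      if PySem.Set.contains diffs (v - f) || PySem.Set.contains sums (v + f) then true
      else pvLoopB vector (PySem.Set.add diffs (v - f)) (PySem.Set.add sums (v + f)) (f + 1) n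
  else false
termination_by (n - f).toNat
decreasing_by all_goals simp_wf; omega

def estan_en_diagonal_alt (vector : List (Option Int)) (n : Int) : Bool :=
  pvLoopB vector PySem.Set.empty PySem.Set.empty 0 n

-- ===== PRECONDITION & SPEC =====
-- Pre_ excludes n > len(vector), where A raises IndexError except when it finds a conflict among the
-- entries it reads before the first out-of-range access (and then B returns True as well).
def Pre_estan_en_diagonal (vector : List (Option Int)) (n : Int) : Prop :=
  n ≤ (vector.length : Int)
instance (vector : List (Option Int)) (n : Int) : Decidable (Pre_estan_en_diagonal vector n) := by
  unfold Pre_estan_en_diagonal; infer_instance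

def pvWitness_estan_en_diagonal : List (Option Int) × Int := ([some 0, none, some 2], 3)

def Spec_estan_en_diagonal (vector : List (Option Int)) (n : Int) (out : Bool) : Prop := out = estan_en_diagonal_alt vector n
instance (vector : List (Option Int)) (n : Int) (out : Bool) : Decidable (Spec_estan_en_diagonal vector n out) := by unfold Spec_estan_en_diagonal; infer_instance

-- ===== CLAIM (what is proved, stated in full; the proofs are below) =====
def Claim_equal_estan_en_diagonal : Prop := ∀ (vector : List (Option Int)) (n : Int), Dom_estan_en_diagonal vector n → Pre_estan_en_diagonal vector n → Spec_estan_en_diagonal vector n (estan_en_diagonal vector n)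

-- ===== LEMMAS AND PROOFS =====

-- the (index, value) pairs a scan over the index list l actually sees
def pvPairs (vector : List (Option Int)) (l : List Int) : List (Int × Int) :=
  l.filterMap (fun i =>
    match PySem.List.pyGet? vector i with
    | some (some v) => some (i, v)
    | _ => none)

-- A's order: each pair against all later pairs
def pvHasDiagA : List (Int × Int) → Bool
  | [] => false
  | (i, v) :: t =>
    t.any (fun p => (i - p.1).natAbs == (v - p.2).natAbs) || pvHasDiagA t

-- B's order: each pair against the accumulated sets of earlier pairs
def pvHasDiagB : List (Int × Int) → PySem.Set Int → PySem.Set Int → Bool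
  | [], _, _ => false
  | (j, w) :: t, D, S =>
    if PySem.Set.contains D (w - j) || PySem.Set.contains S (w + j) then true
    else pvHasDiagB t (PySem.Set.add D (w - j)) (PySem.Set.add S (w + j))

theorem pvValid_of_pre (vector : List (Option Int)) (n f : Int)
    (hp : n ≤ (vector.length : Int)) (a : Int) (ha : 0 ≤ a) (hf : f ∈ PySem.List.pyRange a n 1) :
    (PySem.List.pyGet? vector f).isSome := by
  rw [PySem.List.mem_pyRange_one] at hf
  rcases h : PySem.List.pyGet? vector f with _ | o
  · rw [PySem.List.pyGet?_eq_none_iff] at h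
    exact absurd ⟨by omega, by omega⟩ h
  · simp

theorem pvPairs_cons (vector : List (Option Int)) (f : Int) (rest : List Int) :
    pvPairs vector (f :: rest)
      = (match PySem.List.pyGet? vector f with
          | some (some v) => [(f, v)]
          | _ => []) ++ pvPairs vector rest := by
  rcases h : PySem.List.pyGet? vector f with _ | (_ | v) <;> simp [pvPairs, h]

-- inversion of '[a,b] <+ p :: t'
theorem pvSub (a b p : Int × Int) (t : List (Int × Int)) (h : [a, b].Sublist (p :: t)) :
    [a, b].Sublist t ∨ (a = p ∧ b ∈ t) := by
  cases h with
  | cons _ h => exact Or.inl h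
  | cons₂ =>
    rename_i h
    exact Or.inr ⟨rfl, List.singleton_sublist.mp h⟩

theorem pvInnerA_eq_any (vector : List (Option Int)) (f1 v1 n : Int) :
    ∀ (k : Nat) (a : Int), (n - a).toNat = k →
      (∀ f ∈ PySem.List.pyRange a n 1, (PySem.List.pyGet? vector f).isSome) →
      pvInnerA vector f1 v1 a n
        = (pvPairs vector (PySem.List.pyRange a n 1)).any
            (fun p => (f1 - p.1).natAbs == (v1 - p.2).natAbs) := by
  intro k
  induction k with
  | zero =>
    intro a hk _
    rw [PySem.List.pyRange_one_eq_nil (by omega), pvInnerA, if_neg (by omega)]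
    rfl
  | succ k ih =>
    intro a hk hv
    have haltn : a < n := by omega
    have hmem : a ∈ PySem.List.pyRange a n 1 := by rw [PySem.List.mem_pyRange_one]; omega
    have hva := hv a hmem
    have hvrest : ∀ f ∈ PySem.List.pyRange (a + 1) n 1, (PySem.List.pyGet? vector f).isSome := by
      intro f hf
      rw [PySem.List.mem_pyRange_one] at hf
      exact hv f (by rw [PySem.List.mem_pyRange_one]; omega)
    have hrest := ih (a + 1) (by omega) hvrest
    rw [PySem.List.pyRange_one_cons haltn, pvPairs_cons, pvInnerA, if_pos haltn]
    rcases h : PySem.List.pyGet? vector a with _ | (_ | v2)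
    · rw [h] at hva; simp at hva
    · simpa [h] using hrest
    · simp only [List.singleton_append, List.any_cons]
      rw [hrest]
      rcases hb : ((f1 - a).natAbs == (v1 - v2).natAbs) with _ | _ <;> simp

theorem pvOuterA_eq_hasDiagA (vector : List (Option Int)) (n : Int)
    (hp : n ≤ (vector.length : Int)) :
    ∀ (k : Nat) (a : Int), 0 ≤ a → (n - a).toNat = k →
      pvOuterA vector n a
        = pvHasDiagA (pvPairs vector (PySem.List.pyRange a n 1)) := by
  intro k
  induction k with
  | zero =>
    intro a ha hk
    rw [PySem.List.pyRange_one_eq_nil (by omega), pvOuterA, if_neg (by omega)]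
    rfl
  | succ k ih =>
    intro a ha hk
    have haltn : a < n := by omega
    have hrest := ih (a + 1) (by omega) (by omega)
    have hvalid : ∀ f ∈ PySem.List.pyRange (a + 1) n 1, (PySem.List.pyGet? vector f).isSome :=
      fun f hf => pvValid_of_pre vector n f hp (a + 1) (by omega) hf
    have hgeta : (PySem.List.pyGet? vector a).isSome :=
      pvValid_of_pre vector n a hp a ha (by rw [PySem.List.mem_pyRange_one]; omega)
    rw [PySem.List.pyRange_one_cons haltn, pvPairs_cons, pvOuterA, if_pos haltn]
    rcases h : PySem.List.pyGet? vector a with _ | (_ | v1)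
    · rw [h] at hgeta; simp at hgeta
    · simpa [h] using hrest
    · simp only [List.singleton_append, pvHasDiagA]
      rw [pvInnerA_eq_any vector a v1 n (n - (a + 1)).toNat (a + 1) rfl hvalid, hrest]
      rcases (pvPairs vector (PySem.List.pyRange (a + 1) n 1)).any
          (fun p => (a - p.1).natAbs == (v1 - p.2).natAbs) with _ | _ <;> simp

theorem pvLoopB_eq_hasDiagB (vector : List (Option Int)) (n : Int) :
    ∀ (k : Nat) (a : Int), (n - a).toNat = k →
      ∀ (D S : PySem.Set Int),
        (∀ f ∈ PySem.List.pyRange a n 1, (PySem.List.pyGet? vector f).isSome) →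
        pvLoopB vector D S a n = pvHasDiagB (pvPairs vector (PySem.List.pyRange a n 1)) D S := by
  intro k
  induction k with
  | zero =>
    intro a hk D S _
    rw [PySem.List.pyRange_one_eq_nil (by omega), pvLoopB, if_neg (by omega)]
    rfl
  | succ k ih =>
    intro a hk D S hv
    have haltn : a < n := by omega
    have hva := hv a (by rw [PySem.List.mem_pyRange_one]; omega)
    have hvrest : ∀ f ∈ PySem.List.pyRange (a + 1) n 1, (PySem.List.pyGet? vector f).isSome := by
      intro f hf
      rw [PySem.List.mem_pyRange_one] at hf
      exact hv f (by rw [PySem.List.mem_pyRange_one]; omega)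
    rw [PySem.List.pyRange_one_cons haltn, pvPairs_cons, pvLoopB, if_pos haltn]
    rcases h : PySem.List.pyGet? vector a with _ | (_ | v)
    · rw [h] at hva; simp at hva
    · simpa [h] using ih (a + 1) (by omega) D S hvrest
    · simp only [List.singleton_append, pvHasDiagB]
      split_ifs with hc
      · rfl
      · exact ih (a + 1) (by omega) _ _ hvrest

-- existence of an ordered conflicting pair, via sublists ([a,b] <+ ps means a occurs before b)
theorem pvHasDiagA_iff (ps : List (Int × Int)) :
    pvHasDiagA ps = true
      ↔ ∃ a b : Int × Int, [a, b].Sublist ps ∧ (a.1 - b.1).natAbs = (a.2 - b.2).natAbs := by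
  induction ps with
  | nil => simp [pvHasDiagA]
  | cons p t ih =>
    obtain ⟨i, v⟩ := p
    rw [pvHasDiagA]
    simp only [Bool.or_eq_true, List.any_eq_true, beq_iff_eq, ih]
    constructor
    · rintro (⟨b, hb, hc⟩ | ⟨a, b, hs, hc⟩)
      · exact ⟨(i, v), b, (List.cons_sublist_cons.mpr (List.singleton_sublist.mpr hb)), hc⟩
      · exact ⟨a, b, hs.trans (List.sublist_cons_self _ _), hc⟩
    · rintro ⟨a, b, hs, hc⟩
      rcases pvSub a b (i, v) t hs with hsub | ⟨ha, hb⟩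
      · exact Or.inr ⟨a, b, hsub, hc⟩
      · exact Or.inl ⟨b, hb, by simpa [ha] using hc⟩

theorem pvHasDiagB_iff (ps : List (Int × Int)) :
    ∀ (D S : PySem.Set Int),
      (pvHasDiagB ps D S = true
        ↔ (∃ p ∈ ps, p.2 - p.1 ∈ D ∨ p.2 + p.1 ∈ S)
          ∨ ∃ a b : Int × Int, [a, b].Sublist ps ∧
              (b.2 - b.1 = a.2 - a.1 ∨ b.2 + b.1 = a.2 + a.1)) := by
  induction ps with
  | nil => simp [pvHasDiagB]
  | cons p t ih =>
    obtain ⟨j, w⟩ := p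
    intro D S
    rw [pvHasDiagB]
    split_ifs with hc
    · simp only [true_iff]
      rcases Bool.or_eq_true .. ▸ hc with h | h
      · exact Or.inl ⟨(j, w), by simp, Or.inl (PySem.Set.contains_iff .. |>.mp h)⟩
      · exact Or.inl ⟨(j, w), by simp, Or.inr (PySem.Set.contains_iff .. |>.mp h)⟩
    · rw [ih]
      have hD : ∀ x, x ∈ PySem.Set.add D (w - j) ↔ x ∈ D ∨ x = w - j :=
        fun x => PySem.Set.mem_add ..
      have hS : ∀ x, x ∈ PySem.Set.add S (w + j) ↔ x ∈ S ∨ x = w + j :=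
        fun x => PySem.Set.mem_add ..
      constructor
      · rintro (⟨p, hp, hm⟩ | ⟨a, b, hs, hcond⟩)
        · rcases hm with hm | hm
          · rcases (hD _).mp hm with hm' | hm'
            · exact Or.inl ⟨p, by simp [hp], Or.inl hm'⟩
            · exact Or.inr ⟨(j, w), p, List.cons_sublist_cons.mpr (List.singleton_sublist.mpr hp),
                Or.inl (by omega)⟩
          · rcases (hS _).mp hm with hm' | hm'
            · exact Or.inl ⟨p, by simp [hp], Or.inr hm'⟩
            · exact Or.inr ⟨(j, w), p, List.cons_sublist_cons.mpr (List.singleton_sublist.mpr hp),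
                Or.inr (by omega)⟩
        · exact Or.inr ⟨a, b, hs.trans (List.sublist_cons_self _ _), hcond⟩
      · rintro (⟨p, hp, hm⟩ | ⟨a, b, hs, hcond⟩)
        · rcases List.mem_cons.mp hp with hp' | hp'
          · subst hp'
            rcases hm with hm | hm
            · exact absurd (Bool.or_eq_true .. ▸ Or.inl ((PySem.Set.contains_iff ..).mpr hm)) hc
            · exact absurd (Bool.or_eq_true .. ▸ Or.inr ((PySem.Set.contains_iff ..).mpr hm)) hc
          · rcases hm with hm | hm
            · exact Or.inl ⟨p, hp', Or.inl ((hD _).mpr (Or.inl hm))⟩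
            · exact Or.inl ⟨p, hp', Or.inr ((hS _).mpr (Or.inl hm))⟩
        · rcases pvSub a b (j, w) t hs with hsub | ⟨ha, hb⟩
          · exact Or.inr ⟨a, b, hsub, hcond⟩
          · subst ha
            rcases hcond with h | h
            · exact Or.inl ⟨b, hb, Or.inl ((hD _).mpr (Or.inr h))⟩
            · exact Or.inl ⟨b, hb, Or.inr ((hS _).mpr (Or.inr h))⟩

theorem pvHasDiag_agree (ps : List (Int × Int)) :
    pvHasDiagA ps = pvHasDiagB ps PySem.Set.empty PySem.Set.empty := by
  rw [Bool.eq_iff_iff, pvHasDiagA_iff, pvHasDiagB_iff]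
  constructor
  · rintro ⟨a, b, hs, hc⟩
    exact Or.inr ⟨a, b, hs, by omega⟩
  · rintro (⟨p, _, hm⟩ | ⟨a, b, hs, hc⟩)
    · simp [PySem.Set.empty] at hm
    · exact ⟨a, b, hs, by omega⟩

-- ===== VERDICT (by name: the statement is the Claim_ definition above) =====
theorem estan_en_diagonal_spec : Claim_equal_estan_en_diagonal := by
  intro vector n _ hp
  unfold Spec_estan_en_diagonal estan_en_diagonal estan_en_diagonal_alt
  rw [pvOuterA_eq_hasDiagA vector n hp (n - 0).toNat 0 le_rfl rfl,
    pvLoopB_eq_hasDiagB vector n (n - 0).toNat 0 rfl PySem.Set.empty PySem.Set.empty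
      (fun f hf => pvValid_of_pre vector n f hp 0 le_rfl hf),
    pvHasDiag_agree]
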